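-- pv_equiv track=rewrite | github.com/dawidpawliczek4/UWr | intro-to-cs/lista 5/zad5.py | Titer
-- ===== SOURCE A (Python) =====
-- def Titer(n, m):
--     # Dwie listy do przechowywania aktualnej i poprzedniej linii
--     prev_line = [0] * (m + 1)
--     current_line = [0] * (m + 1)
--
--     # Inicjalizacja pierwszej linii (przypadki bazowe dla T(0, m))
--     for j in range(m + 1):
--         prev_line[j] = j
--
--     # Obliczanie kolejnych linii
--     for i in range(1, n + 1):
--         # Aktualizacja pierwszego elementu w bieżącej linii (przypadki bazowe dla T(n, 0))
--         current_line[0] = i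
--         for j in range(1, m + 1):
--             current_line[j] = current_line[j - 1] + 2 * prev_line[j]
--         # Aktualizacja linii poprzedniej
--         prev_line = current_line[:]
--
--     return current_line[m]
-- ===== SOURCE B (Python) =====
-- def Titer(n, m):
--     # Closed-form path sum: T(n,m) = 2^n*C(n+m,n+1) + sum_{j=0}^{n-1} 2^j*(j+2-n)*C(m+j,m),
--     # with both binomials computed incrementally in one O(n) loop.
--     if m == 0:
--         return n          # base case T(n,0) = n
--     acc = 0
--     c = 1                      # C(m+j, m) for the current j
--     p = 1                      # 2^j
--     for j in range(n):
--         acc += p * (j + 2 - n) * c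
--         c = c * (m + j + 1) // (j + 1)
--         p *= 2
--     # now c = C(m+n, m), p = 2^n; and C(n+m, n+1) = C(n+m, n) * m // (n+1)
--     return acc + p * (c * m // (n + 1))
-- ===== Notes on version B (the rewrite author's own statement) =====
-- stated objective: faster
-- what changed: Replaced the O(n*m) two-row dynamic programme by the closed-form path sum T(n,m) = 2^n*C(n+m,n+1) + sum_{j<n} 2^j*(j+2-n)*C(m+j,m), with both binomial coefficients maintained incrementally in a single O(n) loop.
-- intended difference: For n = 0 and m >= 1, A returns 0 because it initializes the T(0,m)=m base row only in prev_line and never copies it into current_line, while B returns m, the base case A's own comment documents as intended. — e.g. on Titer(0, 3): A returns 0, B returns 3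
-- outside the precondition, e.g. on Titer(-3, 2): A returns 0, B returns -1; on Titer(-1, 2): A returns 0, B raises ZeroDivisionError
import Mathlib
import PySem

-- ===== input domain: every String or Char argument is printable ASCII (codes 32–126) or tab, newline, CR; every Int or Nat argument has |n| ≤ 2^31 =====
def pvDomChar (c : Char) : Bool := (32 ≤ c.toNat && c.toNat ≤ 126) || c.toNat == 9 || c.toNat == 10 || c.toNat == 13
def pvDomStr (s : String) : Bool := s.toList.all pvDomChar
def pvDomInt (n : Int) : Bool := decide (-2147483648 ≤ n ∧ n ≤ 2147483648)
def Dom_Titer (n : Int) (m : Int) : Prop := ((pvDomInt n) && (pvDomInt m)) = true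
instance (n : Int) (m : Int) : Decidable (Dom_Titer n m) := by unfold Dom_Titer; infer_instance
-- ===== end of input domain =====

-- B replaces A's O(n*m) two-row DP by a closed-form binomial path sum computed in one O(n) loop.

-- ===== PORT A =====
-- Rows are Arrays for O(1) writes, matching Python's list assignment; every index used by the
-- loops is nonnegative and (on inputs admitted by Pre_) in range, where `.toNat`, `setIfInBounds`
-- and `getD` are exact for Python's lst[i] read/write.
def Titer (n : Int) (m : Int) : Int :=
  -- prev_line = [0]*(m+1); current_line = [0]*(m+1)
  let prev_line : Array Int := Array.replicate (m+1).toNat 0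
  let current_line : Array Int := Array.replicate (m+1).toNat 0
  -- for j in range(m+1): prev_line[j] = j
  let prev_line := (PySem.List.pyRange 0 (m+1) 1).foldl
    (fun pl j => pl.setIfInBounds j.toNat j) prev_line
  -- for i in range(1, n+1): …
  let st := (PySem.List.pyRange 1 (n+1) 1).foldl
    (fun (st : Array Int × Array Int) i =>
      let pl := st.1
      let cl := st.2.setIfInBounds 0 i                 -- current_line[0] = i
      let cl := (PySem.List.pyRange 1 (m+1) 1).foldl
        (fun cl j =>
          cl.setIfInBounds j.toNat
            (cl.getD (j-1).toNat 0 + 2 * pl.getD j.toNat 0)) cl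
      (cl, cl))                                        -- prev_line = current_line[:]
    (prev_line, current_line)
  st.2.getD m.toNat 0                                  -- return current_line[m]

-- ===== PORT B =====
def Titer_alt (n : Int) (m : Int) : Int :=
  if m = 0 then n else
  let st := (PySem.List.pyRange 0 n 1).foldl
    (fun (st : Int × Int × Int) j =>
      (st.1 + st.2.2 * (j + 2 - n) * st.2.1,                       -- acc += p*(j+2-n)*c
       PySem.Int.floordiv (st.2.1 * (m + j + 1)) (j + 1),          -- c = c*(m+j+1)//(j+1)
       st.2.2 * 2))                                                -- p *= 2
    (0, 1, 1)
  st.1 + st.2.2 * (PySem.Int.floordiv (st.2.1 * m) (n + 1))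

-- ===== PRECONDITION & SPEC =====
-- Pre_ excludes m < 0, where A raises IndexError (current_line[m] on an empty list), and n < 0,
-- which is outside the natural domain of the recurrence: A returns 0 there only by accident
-- (its outer loop never runs), and B does not reproduce that (see claim cites).
def Pre_Titer (n : Int) (m : Int) : Prop := 0 ≤ n ∧ 0 ≤ m
instance (n : Int) (m : Int) : Decidable (Pre_Titer n m) := by unfold Pre_Titer; infer_instance
def pvWitness_Titer : Int × Int := (2, 2)

-- For n = 0 and m ≥ 1, A returns 0 (it never copies the initialized T(0,m)=m base row into
-- current_line), while B returns m, the base case A's own comment documents as intended.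
def D_Titer (n : Int) (m : Int) : Prop := n = 0 ∧ 1 ≤ m
instance (n : Int) (m : Int) : Decidable (D_Titer n m) := by unfold D_Titer; infer_instance

def Spec_Titer (n : Int) (m : Int) (out : Int) : Prop := ¬ D_Titer n m → out = Titer_alt n m
instance (n : Int) (m : Int) (out : Int) : Decidable (Spec_Titer n m out) := by unfold Spec_Titer; infer_instance

def pvDiffWitness_Titer : Int × Int := (0, 3)
def pvDiffWitnessOut_Titer : Int × Int := (0, 3)

-- ===== CLAIM (what is proved, stated in full; the proofs are below) =====
def Claim_unchanged_Titer : Prop := ∀ (n : Int) (m : Int), Dom_Titer n m → Pre_Titer n m → Spec_Titer n m (Titer n m)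
def Claim_changed_Titer : Prop := Dom_Titer (pvDiffWitness_Titer.1) (pvDiffWitness_Titer.2) ∧ Pre_Titer (pvDiffWitness_Titer.1) (pvDiffWitness_Titer.2) ∧ D_Titer (pvDiffWitness_Titer.1) (pvDiffWitness_Titer.2) ∧ Titer (pvDiffWitness_Titer.1) (pvDiffWitness_Titer.2) = pvDiffWitnessOut_Titer.1 ∧ Titer_alt (pvDiffWitness_Titer.1) (pvDiffWitness_Titer.2) = pvDiffWitnessOut_Titer.2 ∧ pvDiffWitnessOut_Titer.1 ≠ pvDiffWitnessOut_Titer.2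
def Claim_exact_Titer : Prop := ∀ (n : Int) (m : Int), Dom_Titer n m → Pre_Titer n m → D_Titer n m → Titer n m ≠ Titer_alt n m

-- ===== LEMMAS AND PROOFS =====

-- The mathematical recurrence: T(0,m)=m, T(n,0)=n, T(n,m)=T(n,m-1)+2*T(n-1,m).
def Tspec : Nat → Nat → Int
  | 0, m => m
  | n+1, 0 => (n : Int) + 1
  | n+1, m+1 => Tspec (n+1) m + 2 * Tspec n (m+1)

-- The closed form B computes.
def Fcf (n m : Nat) : Int :=
  2^n * ((n+m).choose (n+1) : Int)
    + ∑ j ∈ Finset.range n, 2^j * ((j : Int) + 2 - n) * ((m+j).choose m : Int)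

theorem sum_pow_two (n : Nat) : (∑ j ∈ Finset.range n, (2:Int)^j) = 2^n - 1 := by
  induction n with
  | zero => simp
  | succ k ih => rw [Finset.sum_range_succ, ih]; ring

theorem sum_lin (n : Nat) :
    (∑ j ∈ Finset.range n, (2:Int)^j * ((j : Int) + 2 - n)) = n := by
  induction n with
  | zero => simp
  | succ k ih =>
    rw [Finset.sum_range_succ]
    push_cast
    have : (∑ j ∈ Finset.range k, (2:Int)^j * ((j : Int) + 2 - (k+1)))
        = (∑ j ∈ Finset.range k, (2:Int)^j * ((j : Int) + 2 - k))
          - ∑ j ∈ Finset.range k, (2:Int)^j := by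
      rw [← Finset.sum_sub_distrib]
      apply Finset.sum_congr rfl; intro j _; ring
    rw [this, ih, sum_pow_two]; ring

theorem Fcf_rec (n m : Nat) : Fcf (n+1) (m+1) = Fcf (n+1) m + 2 * Fcf n (m+1) := by
  unfold Fcf
  have hC : (((n+1+(m+1)).choose (n+1+1) : Nat) : Int)
      = ((n+1+m).choose (n+1+1) : Int) + ((n+(m+1)).choose (n+1) : Int) := by
    have h1 : n+1+(m+1) = (n+1+m)+1 := by omega
    have h2 : n+(m+1) = n+1+m := by omega
    rw [h1, h2, Nat.choose_succ_succ]
    push_cast; ring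
  have hS : (∑ j ∈ Finset.range (n+1), 2^j * ((j : Int) + 2 - (n+1)) * (((m+1)+j).choose (m+1) : Int))
      = (∑ j ∈ Finset.range (n+1), 2^j * ((j : Int) + 2 - (n+1)) * ((m+j).choose m : Int))
        + 2 * ∑ j ∈ Finset.range n, 2^j * ((j : Int) + 2 - n) * (((m+1)+j).choose (m+1) : Int) := by
    have hpas : (∑ j ∈ Finset.range (n+1), 2^j * ((j : Int) + 2 - (n+1)) * (((m+1)+j).choose (m+1) : Int))
        = (∑ j ∈ Finset.range (n+1), 2^j * ((j : Int) + 2 - (n+1)) * ((m+j).choose m : Int))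
          + ∑ j ∈ Finset.range (n+1), 2^j * ((j : Int) + 2 - (n+1)) * ((m+j).choose (m+1) : Int) := by
      rw [← Finset.sum_add_distrib]
      apply Finset.sum_congr rfl; intro j _
      have h1 : (m+1)+j = (m+j)+1 := by omega
      rw [h1, Nat.choose_succ_succ]
      push_cast; ring
    have hshift : (∑ j ∈ Finset.range (n+1), 2^j * ((j : Int) + 2 - (n+1)) * ((m+j).choose (m+1) : Int))
        = 2 * ∑ j ∈ Finset.range n, 2^j * ((j : Int) + 2 - n) * (((m+1)+j).choose (m+1) : Int) := by
      rw [Finset.sum_range_succ' (fun j => 2^j * ((j : Int) + 2 - (n+1)) * ((m+j).choose (m+1) : Int)) n]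
      have h0 : ((m+0).choose (m+1) : Int) = 0 := by
        rw [Nat.choose_eq_zero_of_lt (by omega)]; rfl
      rw [h0, Finset.mul_sum]
      simp only [mul_zero, add_zero]
      apply Finset.sum_congr rfl; intro j _
      have h1 : m+(j+1) = (m+1)+j := by omega
      rw [h1]
      push_cast; ring
    rw [hpas, hshift]
  rw [hC]; push_cast; rw [hS]; ring

theorem Fcf_eq_Tspec (n m : Nat) : Fcf n m = Tspec n m := by
  induction n generalizing m with
  | zero =>
    unfold Fcf
    simp [Tspec, Nat.choose_one_right]
  | succ n ihn =>
    induction m with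
    | zero =>
      unfold Fcf
      have h1 : ((n+1+0).choose (n+1+1)) = 0 := Nat.choose_eq_zero_of_lt (by omega)
      have h2 := sum_lin (n+1)
      push_cast at h2 ⊢
      simp only [h1, Nat.cast_zero, mul_zero, zero_add, Nat.choose_zero_right,
        Nat.cast_one, mul_one]
      rw [h2]
      simp [Tspec]
    | succ m ihm =>
      rw [Fcf_rec, ihm, ihn (m+1)]
      simp [Tspec]

-- B's loop invariant and value.
theorem alt_step (n m : Nat) :
    ∀ k : Nat,
      (List.map (fun j : Nat => (j : Int)) (List.range k)).foldl
        (fun (st : Int × Int × Int) j =>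
          (st.1 + st.2.2 * (j + 2 - (n:Int)) * st.2.1,
           PySem.Int.floordiv (st.2.1 * ((m:Int) + j + 1)) (j + 1),
           st.2.2 * 2))
        (0, 1, 1)
      = (∑ j ∈ Finset.range k, 2^j * ((j : Int) + 2 - n) * ((m+j).choose m : Int),
         ((m+k).choose m : Int), 2^k) := by
  intro k
  induction k with
  | zero => simp
  | succ k ih =>
    rw [List.range_succ, List.map_append, List.foldl_append, ih]
    simp only [List.map_cons, List.map_nil, List.foldl_cons, List.foldl_nil]
    refine Prod.ext ?_ (Prod.ext ?_ ?_)
    · simp [Finset.sum_range_succ]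
    · show PySem.Int.floordiv (((m+k).choose m : Int) * ((m:Int) + (k:Int) + 1)) ((k:Int) + 1)
          = ((m+(k+1)).choose m : Int)
      have hc : ((m+k).choose m) * (m+k+1) = ((m+k+1).choose (k+1)) * (k+1) := by
        have hsym : (m+k).choose m = (m+k).choose k := by
          have := Nat.choose_symm (n := m+k) (k := k) (by omega)
          simpa [Nat.add_sub_cancel] using this
        rw [hsym, Nat.mul_comm]
        exact Nat.add_one_mul_choose_eq (m+k) k
      have hcast : (((m+k).choose m : Int)) * ((m:Int) + (k:Int) + 1) = (((m+k).choose m * (m+k+1) : Nat) : Int) := by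
        push_cast; ring
      have hone : ((k:Int) + 1) = (((k+1 : Nat)) : Int) := by push_cast; ring
      rw [hcast, hone, PySem.Int.floordiv_natCast, hc, Nat.mul_div_cancel _ (by omega)]
      have hsym2 : (m+k+1).choose (k+1) = (m+(k+1)).choose m := by
        have := Nat.choose_symm (n := m+k+1) (k := k+1) (by omega)
        simpa [Nat.add_sub_cancel, Nat.add_assoc] using this.symm
      rw [hsym2]
    · show (2:Int)^k * 2 = 2^(k+1)
      ring

theorem Fcf_zero (n : Nat) : Fcf n 0 = n := by
  unfold Fcf
  have h1 : ((n+0).choose (n+1)) = 0 := Nat.choose_eq_zero_of_lt (by omega)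
  have h2 := sum_lin n
  simp only [h1, Nat.cast_zero, mul_zero, zero_add, Nat.choose_zero_right,
    Nat.cast_one, mul_one]
  rw [h2]

theorem Titer_alt_eq (n m : Nat) : Titer_alt (n : Int) (m : Int) = Fcf n m := by
  unfold Titer_alt
  rcases Nat.eq_zero_or_pos m with hm0 | hmpos
  · subst hm0
    rw [if_pos (by norm_num), Fcf_zero]
  rw [if_neg (by exact_mod_cast Nat.pos_iff_ne_zero.mp hmpos)]
  rw [PySem.List.pyRange_zero_nat, alt_step n m n]
  dsimp only
  have hd : PySem.Int.floordiv (((m+n).choose m : Int) * (m:Int)) ((n:Int) + 1)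
      = (((n+m).choose (n+1) : Nat) : Int) := by
    have hc : ((m+n).choose m) * m = ((m+n).choose (n+1)) * (n+1) := by
      have hsym : (m+n).choose m = (m+n).choose n := by
        have := Nat.choose_symm (n := m+n) (k := n) (by omega)
        simpa [Nat.add_sub_cancel] using this
      have h2 := Nat.choose_succ_right_eq (m+n) n
      rw [Nat.add_sub_cancel] at h2
      rw [hsym]
      exact h2.symm
    have hcast : (((m+n).choose m : Int)) * (m:Int) = (((m+n).choose m * m : Nat) : Int) := by
      push_cast; ring
    have hone : ((n:Int) + 1) = (((n+1 : Nat)) : Int) := by push_cast; ring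
    rw [hcast, hone, PySem.Int.floordiv_natCast, hc, Nat.mul_div_cancel _ (by omega)]
    rw [Nat.add_comm m n]
  rw [hd]
  unfold Fcf
  ring

-- A's loops and value.
def rowm (i m : Nat) : List Int := (List.range (m+1)).map (fun j => Tspec i j)

theorem rowm_length (i m : Nat) : (rowm i m).length = m+1 := by simp [rowm]

theorem rowm_getD (i m t : Nat) (h : t < m+1) : (rowm i m).getD t 0 = Tspec i t := by
  simp [rowm, List.getD, h]

theorem initrow_aux (m : Nat) :
    ∀ k, k ≤ m+1 →
      (List.range k).foldl (fun pl (j : Nat) => pl.set j (j:Int)) (List.replicate (m+1) (0:Int))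
      = (List.range (m+1)).map (fun j => if j < k then (j:Int) else 0) := by
  intro k hk
  induction k with
  | zero =>
    apply List.ext_getElem
    · simp
    · intro t h1 h2; simp
  | succ k ih =>
    rw [List.range_succ, List.foldl_append, ih (by omega)]
    simp only [List.foldl_cons, List.foldl_nil]
    apply List.ext_getElem
    · simp
    · intro t h1 h2
      simp only [List.getElem_set, List.getElem_map, List.getElem_range]
      simp only [List.length_set, List.length_map, List.length_range] at h1
      split_ifs with e1 e2 e3 <;> first | rfl | omega

theorem initrow (m : Nat) :
    (PySem.List.pyRange 0 ((m:Int)+1) 1).foldl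
      (fun pl j => pl.set j.toNat j) (List.replicate (m+1) (0:Int)) = rowm 0 m := by
  rw [show ((m:Int)+1) = (((m+1:Nat)):Int) by push_cast; ring, PySem.List.pyRange_zero_nat,
    List.foldl_map]
  simp only [Int.toNat_natCast]
  rw [initrow_aux m (m+1) le_rfl]
  apply List.ext_getElem
  · simp [rowm]
  · intro t h1 h2
    simp only [List.length_map, List.length_range] at h1
    simp only [rowm, List.getElem_map, List.getElem_range]
    rw [if_pos h1]
    simp [Tspec]

theorem inner_row (m i₀ : Nat) (cl : List Int) (hcl : cl.length = m+1) :
    ∀ k, k ≤ m →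
      (PySem.List.pyRange 1 ((k:Int)+1) 1).foldl
        (fun cl j => cl.set j.toNat
          (cl.getD (j-1).toNat 0 + 2 * (rowm i₀ m).getD j.toNat 0))
        (cl.set 0 ((i₀:Int)+1))
      = (List.range (m+1)).map (fun t => if t ≤ k then Tspec (i₀+1) t else cl.getD t 0) := by
  intro k hk
  induction k with
  | zero =>
    rw [PySem.List.pyRange_one_eq_nil (by omega)]
    simp only [List.foldl_nil]
    apply List.ext_getElem
    · simp [hcl]
    · intro t h1 h2
      simp only [List.getElem_set, List.getElem_map, List.getElem_range]
      simp only [List.length_set, hcl] at h1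
      by_cases ht : t = 0
      · subst ht
        simp [Tspec]
      · rw [if_neg (by omega), if_neg (by omega), List.getD_eq_getElem cl 0 (by omega)]
  | succ k ih =>
    rw [show ((k+1:Nat):Int)+1 = (((k:Int))+1)+1 by push_cast; ring,
      PySem.List.pyRange_one_succ_right (a := 1) (b := (k:Int)+1) (by omega),
      List.foldl_append, ih (by omega)]
    simp only [List.foldl_cons, List.foldl_nil]
    have hgd1 : ((k:Int)+1)-1 = ((k:Nat):Int) := by ring
    have hgd2 : ((k:Int)+1) = (((k+1:Nat)):Int) := by push_cast; ring
    rw [hgd1, hgd2]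
    simp only [Int.toNat_natCast]
    have hLk : ((List.range (m+1)).map (fun t => if t ≤ k then Tspec (i₀+1) t else cl.getD t 0)).getD k 0
        = Tspec (i₀+1) k := by
      rw [List.getD_eq_getElem _ _ (by simp; omega)]
      simp only [List.getElem_map, List.getElem_range]
      rw [if_pos le_rfl]
    rw [hLk, rowm_getD i₀ m (k+1) (by omega)]
    apply List.ext_getElem
    · simp
    · intro t h1 h2
      simp only [List.getElem_set, List.getElem_map, List.getElem_range]
      simp only [List.length_set, List.length_map, List.length_range] at h1
      by_cases ht : t = k+1
      · subst ht
        rw [if_pos rfl, if_pos le_rfl]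
        simp [Tspec]
      · rw [if_neg (fun h => ht h.symm)]
        by_cases ht2 : t ≤ k
        · rw [if_pos ht2, if_pos (by omega)]
        · rw [if_neg ht2, if_neg (by omega)]

theorem inner_row_top (m i₀ : Nat) (cl : List Int) (hcl : cl.length = m+1) :
    (PySem.List.pyRange 1 ((m:Int)+1) 1).foldl
      (fun cl j => cl.set j.toNat
        (cl.getD (j-1).toNat 0 + 2 * (rowm i₀ m).getD j.toNat 0))
      (cl.set 0 ((i₀:Int)+1))
    = rowm (i₀+1) m := by
  rw [inner_row m i₀ cl hcl m le_rfl]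
  apply List.map_congr_left
  intro t ht
  rw [if_pos (by simp at ht; omega)]

theorem outer_fold (n m : Nat) :
    (PySem.List.pyRange 1 ((n:Int)+1) 1).foldl
      (fun (st : List Int × List Int) i =>
        ((PySem.List.pyRange 1 ((m:Int)+1) 1).foldl
          (fun cl j =>
            cl.set j.toNat
              (cl.getD (j-1).toNat 0 + 2 * st.1.getD j.toNat 0)) (st.2.set 0 i),
         (PySem.List.pyRange 1 ((m:Int)+1) 1).foldl
          (fun cl j =>
            cl.set j.toNat
              (cl.getD (j-1).toNat 0 + 2 * st.1.getD j.toNat 0)) (st.2.set 0 i)))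
      (rowm 0 m, List.replicate (m+1) (0:Int))
    = (rowm n m, if n = 0 then List.replicate (m+1) (0:Int) else rowm n m) := by
  induction n with
  | zero =>
    have h : PySem.List.pyRange 1 (((0:Nat):Int)+1) 1 = [] :=
      PySem.List.pyRange_one_eq_nil (by norm_num)
    rw [h]
    simp
  | succ n ih =>
    rw [show ((n+1:Nat):Int)+1 = (((n:Int))+1)+1 by push_cast; ring,
      PySem.List.pyRange_one_succ_right (a := 1) (b := (n:Int)+1) (by omega),
      List.foldl_append, ih]
    simp only [List.foldl_cons, List.foldl_nil]
    have hlen : (if n = 0 then List.replicate (m+1) (0:Int) else rowm n m).length = m+1 := by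
      split_ifs <;> simp [rowm_length]
    rw [inner_row_top m n (if n = 0 then List.replicate (m+1) (0:Int) else rowm n m) hlen]
    simp

theorem arr_getD (a : Array Int) (i : Nat) (d : Int) : a.getD i d = a.toList.getD i d := by
  simp [Array.getD, List.getD]
  split <;> simp_all

theorem toList_foldl_arr (l : List Int) (g : Array Int → Int → Array Int)
    (f : List Int → Int → List Int)
    (h : ∀ arr x, (g arr x).toList = f arr.toList x) :
    ∀ arr : Array Int, (l.foldl g arr).toList = l.foldl f arr.toList := by
  induction l with
  | nil => intro arr; rfl
  | cons a t ih => intro arr; rw [List.foldl_cons, List.foldl_cons, ih, h]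

theorem toList_foldl_pair (l : List Int)
    (g : Array Int × Array Int → Int → Array Int × Array Int)
    (f : List Int × List Int → Int → List Int × List Int)
    (h : ∀ st x, ((g st x).1.toList, (g st x).2.toList) = f (st.1.toList, st.2.toList) x) :
    ∀ st, ((l.foldl g st).1.toList, (l.foldl g st).2.toList)
      = l.foldl f (st.1.toList, st.2.toList) := by
  induction l with
  | nil => intro st; rfl
  | cons a t ih => intro st; rw [List.foldl_cons, List.foldl_cons, ih, h]

theorem body_compat (m : Nat) :
    ∀ (st : Array Int × Array Int) (x : Int),
      (((fun (st : Array Int × Array Int) i =>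
          ((PySem.List.pyRange 1 ((m:Int)+1) 1).foldl
            (fun cl j =>
              cl.setIfInBounds j.toNat
                (cl.getD (j-1).toNat 0 + 2 * st.1.getD j.toNat 0))
            (st.2.setIfInBounds 0 i),
          (PySem.List.pyRange 1 ((m:Int)+1) 1).foldl
            (fun cl j =>
              cl.setIfInBounds j.toNat
                (cl.getD (j-1).toNat 0 + 2 * st.1.getD j.toNat 0))
            (st.2.setIfInBounds 0 i))) st x).1.toList,
       ((fun (st : Array Int × Array Int) i =>
          ((PySem.List.pyRange 1 ((m:Int)+1) 1).foldl
            (fun cl j =>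
              cl.setIfInBounds j.toNat
                (cl.getD (j-1).toNat 0 + 2 * st.1.getD j.toNat 0))
            (st.2.setIfInBounds 0 i),
          (PySem.List.pyRange 1 ((m:Int)+1) 1).foldl
            (fun cl j =>
              cl.setIfInBounds j.toNat
                (cl.getD (j-1).toNat 0 + 2 * st.1.getD j.toNat 0))
            (st.2.setIfInBounds 0 i))) st x).2.toList)
      = (fun (st : List Int × List Int) i =>
        ((PySem.List.pyRange 1 ((m:Int)+1) 1).foldl
          (fun cl j =>
            cl.set j.toNat
              (cl.getD (j-1).toNat 0 + 2 * st.1.getD j.toNat 0)) (st.2.set 0 i),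
         (PySem.List.pyRange 1 ((m:Int)+1) 1).foldl
          (fun cl j =>
            cl.set j.toNat
              (cl.getD (j-1).toNat 0 + 2 * st.1.getD j.toNat 0)) (st.2.set 0 i))) (st.1.toList, st.2.toList) x := by
  intro st x
  dsimp only
  have hin : ((PySem.List.pyRange 1 ((m:Int)+1) 1).foldl
      (fun cl j =>
        cl.setIfInBounds j.toNat
          (cl.getD (j-1).toNat 0 + 2 * st.1.getD j.toNat 0))
      (st.2.setIfInBounds 0 x)).toList
      = (PySem.List.pyRange 1 ((m:Int)+1) 1).foldl
        (fun cl j =>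
          cl.set j.toNat
            (cl.getD (j-1).toNat 0 + 2 * st.1.toList.getD j.toNat 0))
        (st.2.toList.set 0 x) := by
    rw [toList_foldl_arr _ _
      (fun cl j => cl.set j.toNat (cl.getD (j-1).toNat 0 + 2 * st.1.toList.getD j.toNat 0))
      (fun arr y => by rw [Array.toList_setIfInBounds, arr_getD, arr_getD]),
      Array.toList_setIfInBounds]
  rw [hin]

theorem Titer_eq (n m : Nat) :
    Titer (n : Int) (m : Int) = if n = 0 then 0 else Tspec n m := by
  unfold Titer
  dsimp only
  have htn : (((m:Int))+1).toNat = m+1 := by omega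
  rw [htn]
  have h2 := congrArg Prod.snd (toList_foldl_pair (PySem.List.pyRange 1 ((n:Int)+1) 1)
    (fun (st : Array Int × Array Int) i =>
      let pl := st.1
      let cl := st.2.setIfInBounds 0 i
      let cl := (PySem.List.pyRange 1 ((m:Int)+1) 1).foldl
        (fun cl j =>
          cl.setIfInBounds j.toNat
            (cl.getD (j-1).toNat 0 + 2 * pl.getD j.toNat 0)) cl
      (cl, cl))
    (fun (st : List Int × List Int) i =>
        ((PySem.List.pyRange 1 ((m:Int)+1) 1).foldl
          (fun cl j =>
            cl.set j.toNat
              (cl.getD (j-1).toNat 0 + 2 * st.1.getD j.toNat 0)) (st.2.set 0 i),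
         (PySem.List.pyRange 1 ((m:Int)+1) 1).foldl
          (fun cl j =>
            cl.set j.toNat
              (cl.getD (j-1).toNat 0 + 2 * st.1.getD j.toNat 0)) (st.2.set 0 i)))
    (body_compat m)
    ((PySem.List.pyRange 0 ((m:Int)+1) 1).foldl
        (fun pl j => pl.setIfInBounds j.toNat j) (Array.replicate (m+1) (0:Int)),
     Array.replicate (m+1) (0:Int)))
  dsimp only at h2
  rw [arr_getD, h2]
  rw [toList_foldl_arr _ _ (fun pl j => pl.set j.toNat j)
      (fun arr y => Array.toList_setIfInBounds), Array.toList_replicate, initrow m,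
    outer_fold n m]
  rcases Nat.eq_zero_or_pos n with h0 | hpos
  · subst h0
    rw [if_pos rfl, if_pos rfl]
    simp
  · rw [if_neg (by omega), if_neg (by omega)]
    dsimp only
    rw [show ((m:Int)).toNat = m from Int.toNat_natCast m, rowm_getD n m m (by omega)]

-- ===== VERDICT (by name: the statement is the Claim_ definition above) =====
theorem Titer_spec : Claim_unchanged_Titer := by
  intro n m _ hpre hnd
  obtain ⟨hn, hm⟩ := hpre
  obtain ⟨nn, rfl⟩ : ∃ k : Nat, n = (k : Int) := ⟨n.toNat, (Int.toNat_of_nonneg hn).symm⟩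
  obtain ⟨mm, rfl⟩ : ∃ k : Nat, m = (k : Int) := ⟨m.toNat, (Int.toNat_of_nonneg hm).symm⟩
  rw [Titer_eq, Titer_alt_eq, Fcf_eq_Tspec]
  rcases Nat.eq_zero_or_pos nn with h0 | hpos
  · subst h0
    have hm0 : mm = 0 := by
      by_contra hne
      exact hnd ⟨rfl, by exact_mod_cast Nat.one_le_iff_ne_zero.mpr hne⟩
    subst hm0; simp [Tspec]
  · rw [if_neg (Nat.pos_iff_ne_zero.mp hpos)]

theorem Titer_changed : Claim_changed_Titer := by unfold Claim_changed_Titer; decide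

theorem Titer_tight : Claim_exact_Titer := by
  intro n m _ hpre hd
  obtain ⟨hn0, hm1⟩ := hd
  subst hn0
  obtain ⟨mm, rfl⟩ : ∃ k : Nat, m = (k : Int) := ⟨m.toNat, (Int.toNat_of_nonneg hpre.2).symm⟩
  have hA := Titer_eq 0 mm
  have hB := Titer_alt_eq 0 mm
  rw [if_pos rfl] at hA
  push_cast at hA hB
  rw [hA, hB, Fcf_eq_Tspec]
  simp only [Tspec]
  omega
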